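-- pv_equiv track=rewrite | github.com/BALAJIRAMESHR/TCS-Codevita-Round-2 | Bands 3.py | get_band_positions
-- ===== SOURCE A (Python) =====
-- def get_coordinates(curr_pos, move):
--     ly, y, x = curr_pos
--     if move == "u":
--         return (ly, y - 1, x)
--     elif move == "d":
--         return (ly, y + 1, x)
--     elif move == "f":
--         return (ly + 1, y, x)
--     elif move == "b":
--         return (ly - 1, y, x)
--     elif move == "r":
--         return (ly, y, x + 1)
--     elif move == "l":
--         return (ly, y, x - 1)
--     return curr_pos
--
-- def is_valid_position(pos, S):
--     """Check if all coordinates are within bounds."""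
--     return all(0 <= coord < S for coord in pos)
--
-- def get_band_positions(start_pos, sequence, S):
--     """Generate all positions for a band's movement."""
--     positions = []
--     curr_pos = start_pos
--     positions.append(curr_pos)
--
--     for move in sequence:
--         next_pos = get_coordinates(curr_pos, move)
--         if not is_valid_position(next_pos, S):
--             return None
--         positions.append(next_pos)
--         curr_pos = next_pos
--
--     return positions
-- ===== SOURCE B (Python) =====
-- from itertools import accumulate
--
-- def _deltas(sequence, plus, minus):
--     return [1 if m == plus else -1 if m == minus else 0 for m in sequence]
--
-- def _axis_ok(axis, S):
--     return all(0 <= c < S for c in axis[1:])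
--
-- def get_band_positions(start_pos, sequence, S):
--     # Three independent 1-D trajectories, one per axis, as prefix sums of +-1/0 deltas.
--     lys = list(accumulate(_deltas(sequence, "f", "b"), initial=start_pos[0]))
--     ys = list(accumulate(_deltas(sequence, "d", "u"), initial=start_pos[1]))
--     xs = list(accumulate(_deltas(sequence, "r", "l"), initial=start_pos[2]))
--     if _axis_ok(lys, S) and _axis_ok(ys, S) and _axis_ok(xs, S):
--         return list(zip(lys, ys, xs))
--     return None
-- ===== Notes on version B (the rewrite author's own statement) =====
-- stated objective: alternative
-- what changed: B decomposes the 3-D walk into three independent 1-D per-axis trajectories (prefix sums of +1/-1/0 delta lists), bounds-checks each axis list separately, and zips the three lists back into 3-tuples, instead of A's single stateful walk over 3-D positions with an interleaved per-step validity check and early exit.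
import Mathlib
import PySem

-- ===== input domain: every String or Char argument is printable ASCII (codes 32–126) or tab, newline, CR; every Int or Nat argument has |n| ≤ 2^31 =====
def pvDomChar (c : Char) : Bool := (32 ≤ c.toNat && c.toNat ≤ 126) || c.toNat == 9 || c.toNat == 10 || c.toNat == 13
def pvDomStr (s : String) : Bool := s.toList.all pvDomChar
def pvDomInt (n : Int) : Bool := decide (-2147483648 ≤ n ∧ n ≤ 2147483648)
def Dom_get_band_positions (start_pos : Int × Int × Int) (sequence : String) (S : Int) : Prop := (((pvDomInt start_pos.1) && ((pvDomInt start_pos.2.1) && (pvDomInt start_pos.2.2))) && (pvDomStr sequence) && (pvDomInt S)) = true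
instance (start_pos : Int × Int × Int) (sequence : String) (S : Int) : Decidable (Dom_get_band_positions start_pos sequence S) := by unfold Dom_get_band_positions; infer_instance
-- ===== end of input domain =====

-- B decomposes the 3-D walk into three independent per-axis prefix-sum trajectories, checks each axis, then zips them (alternative decomposition; same O(n)).
-- ===== PORT A =====
def get_coordinates (curr_pos : Int × Int × Int) (move : Char) : Int × Int × Int :=
  let ly := curr_pos.1; let y := curr_pos.2.1; let x := curr_pos.2.2
  if move = 'u' then (ly, y - 1, x)
  else if move = 'd' then (ly, y + 1, x)
  else if move = 'f' then (ly + 1, y, x)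
  else if move = 'b' then (ly - 1, y, x)
  else if move = 'r' then (ly, y, x + 1)
  else if move = 'l' then (ly, y, x - 1)
  else curr_pos

def is_valid_position (pos : Int × Int × Int) (S : Int) : Bool :=
  decide (0 ≤ pos.1 ∧ pos.1 < S) && decide (0 ≤ pos.2.1 ∧ pos.2.1 < S) && decide (0 ≤ pos.2.2 ∧ pos.2.2 < S)

def get_band_positions_loop (curr_pos : Int × Int × Int) (moves : List Char) (S : Int) :
    Option (List (Int × Int × Int)) :=
  match moves with
  | [] => some []
  | move :: rest =>
    let next_pos := get_coordinates curr_pos move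
    if ¬ is_valid_position next_pos S then none
    else (get_band_positions_loop next_pos rest S).map (next_pos :: ·)

def get_band_positions (start_pos : Int × Int × Int) (sequence : String) (S : Int) : Option (List (Int × Int × Int)) :=
  (get_band_positions_loop start_pos sequence.toList S).map (start_pos :: ·)

-- ===== PORT B =====
def pvDeltas (moves : List Char) (plus minus : Char) : List Int :=
  moves.map (fun m => if m = plus then 1 else if m = minus then (-1 : Int) else 0)

def pvPrefix (init : Int) (ds : List Int) : List Int := List.scanl (· + ·) init ds

def pvAxisOk (axis : List Int) (S : Int) : Bool :=
  (axis.drop 1).all (fun c => decide (0 ≤ c ∧ c < S))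

def pvZip3 (a b c : List Int) : List (Int × Int × Int) := a.zip (b.zip c)

def get_band_positions_alt (start_pos : Int × Int × Int) (sequence : String) (S : Int) : Option (List (Int × Int × Int)) :=
  let moves := sequence.toList
  let lys := pvPrefix start_pos.1 (pvDeltas moves 'f' 'b')
  let ys := pvPrefix start_pos.2.1 (pvDeltas moves 'd' 'u')
  let xs := pvPrefix start_pos.2.2 (pvDeltas moves 'r' 'l')
  if pvAxisOk lys S && pvAxisOk ys S && pvAxisOk xs S then some (pvZip3 lys ys xs) else none

-- ===== PRECONDITION & SPEC =====
def Spec_get_band_positions (start_pos : Int × Int × Int) (sequence : String) (S : Int) (out : Option (List (Int × Int × Int))) : Prop := out = get_band_positions_alt start_pos sequence S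
instance (start_pos : Int × Int × Int) (sequence : String) (S : Int) (out : Option (List (Int × Int × Int))) : Decidable (Spec_get_band_positions start_pos sequence S out) := by unfold Spec_get_band_positions; infer_instance

-- ===== CLAIM (what is proved, stated in full; the proofs are below) =====
def Claim_equal_get_band_positions : Prop := ∀ (start_pos : Int × Int × Int) (sequence : String) (S : Int), Dom_get_band_positions start_pos sequence S → Spec_get_band_positions start_pos sequence S (get_band_positions start_pos sequence S)

-- ===== LEMMAS AND PROOFS =====
-- one step of A equals adding the three per-axis deltas of B
theorem step_eq_deltas (p : Int × Int × Int) (m : Char) :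
    get_coordinates p m =
      (p.1 + (if m = 'f' then 1 else if m = 'b' then (-1 : Int) else 0),
       p.2.1 + (if m = 'd' then 1 else if m = 'u' then (-1 : Int) else 0),
       p.2.2 + (if m = 'r' then 1 else if m = 'l' then (-1 : Int) else 0)) := by
  obtain ⟨ly, y, x⟩ := p
  simp only [get_coordinates]
  by_cases h1 : m = 'u'
  · subst h1; simp [Prod.ext_iff] <;> omega
  by_cases h2 : m = 'd'
  · subst h2; simp [Prod.ext_iff] <;> omega
  by_cases h3 : m = 'f'
  · subst h3; simp [Prod.ext_iff] <;> omega
  by_cases h4 : m = 'b'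
  · subst h4; simp [Prod.ext_iff] <;> omega
  by_cases h5 : m = 'r'
  · subst h5; simp [Prod.ext_iff] <;> omega
  by_cases h6 : m = 'l'
  · subst h6; simp [Prod.ext_iff] <;> omega
  simp [h1, h2, h3, h4, h5, h6]

theorem pvDeltas_cons (m : Char) (rest : List Char) (p q : Char) :
    pvDeltas (m :: rest) p q =
      (if m = p then 1 else if m = q then (-1 : Int) else 0) :: pvDeltas rest p q := rfl

theorem pvPrefix_cons (a d : Int) (ds : List Int) :
    pvPrefix a (d :: ds) = a :: pvPrefix (a + d) ds := by
  simp [pvPrefix, List.scanl]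

theorem pvPrefix_head_tail (a : Int) (ds : List Int) :
    pvPrefix a ds = a :: (pvPrefix a ds).drop 1 := by
  cases ds <;> simp [pvPrefix, List.scanl]

theorem pvAxisOk_cons (a : Int) (l : List Int) (S : Int) :
    pvAxisOk (a :: l) S = l.all (fun c => decide (0 ≤ c ∧ c < S)) := by
  simp [pvAxisOk]

theorem all_head_tail (l : List Int) (a S : Int) (h : l = a :: l.drop 1) :
    l.all (fun c => decide (0 ≤ c ∧ c < S)) = (decide (0 ≤ a ∧ a < S) && pvAxisOk l S) := by
  conv_lhs => rw [h]
  simp [pvAxisOk]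

-- A's loop in terms of B's three per-axis prefix sums
theorem loop_eq_axes (S : Int) (moves : List Char) (curr : Int × Int × Int) :
    get_band_positions_loop curr moves S =
      (if pvAxisOk (pvPrefix curr.1 (pvDeltas moves 'f' 'b')) S
          && pvAxisOk (pvPrefix curr.2.1 (pvDeltas moves 'd' 'u')) S
          && pvAxisOk (pvPrefix curr.2.2 (pvDeltas moves 'r' 'l')) S
       then some ((pvZip3 (pvPrefix curr.1 (pvDeltas moves 'f' 'b'))
                          (pvPrefix curr.2.1 (pvDeltas moves 'd' 'u'))
                          (pvPrefix curr.2.2 (pvDeltas moves 'r' 'l'))).drop 1)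
       else none) := by
  induction moves generalizing curr with
  | nil => simp [get_band_positions_loop, pvDeltas, pvPrefix, pvAxisOk, pvZip3, List.scanl]
  | cons m rest ih =>
    have hcoord := step_eq_deltas curr m
    have hc1 : curr.1 + (if m = 'f' then 1 else if m = 'b' then (-1 : Int) else 0)
        = (get_coordinates curr m).1 := by rw [hcoord]
    have hc2 : curr.2.1 + (if m = 'd' then 1 else if m = 'u' then (-1 : Int) else 0)
        = (get_coordinates curr m).2.1 := by rw [hcoord]
    have hc3 : curr.2.2 + (if m = 'r' then 1 else if m = 'l' then (-1 : Int) else 0)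
        = (get_coordinates curr m).2.2 := by rw [hcoord]
    set n := get_coordinates curr m with hn
    set P1 := pvPrefix n.1 (pvDeltas rest 'f' 'b') with hP1
    set P2 := pvPrefix n.2.1 (pvDeltas rest 'd' 'u') with hP2
    set P3 := pvPrefix n.2.2 (pvDeltas rest 'r' 'l') with hP3
    have e1 : P1 = n.1 :: P1.drop 1 := by rw [hP1]; exact pvPrefix_head_tail _ _
    have e2 : P2 = n.2.1 :: P2.drop 1 := by rw [hP2]; exact pvPrefix_head_tail _ _
    have e3 : P3 = n.2.2 :: P3.drop 1 := by rw [hP3]; exact pvPrefix_head_tail _ _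
    have hz : pvZip3 P1 P2 P3 = n :: pvZip3 (P1.drop 1) (P2.drop 1) (P3.drop 1) := by
      conv_lhs => rw [e1, e2, e3]
      simp [pvZip3]
    rw [pvDeltas_cons, pvDeltas_cons, pvDeltas_cons, pvPrefix_cons, pvPrefix_cons, pvPrefix_cons,
      hc1, hc2, hc3, ← hP1, ← hP2, ← hP3,
      pvAxisOk_cons, pvAxisOk_cons, pvAxisOk_cons,
      all_head_tail P1 n.1 S e1, all_head_tail P2 n.2.1 S e2, all_head_tail P3 n.2.2 S e3]
    simp only [get_band_positions_loop, ← hn, ih n, ← hP1, ← hP2, ← hP3]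
    have zc : pvZip3 (curr.1 :: P1) (curr.2.1 :: P2) (curr.2.2 :: P3)
        = (curr.1, curr.2.1, curr.2.2) :: pvZip3 P1 P2 P3 := by simp [pvZip3]
    by_cases hv : is_valid_position n S = true
    · have hv' : (0 ≤ n.1 ∧ n.1 < S) ∧ (0 ≤ n.2.1 ∧ n.2.1 < S) ∧ (0 ≤ n.2.2 ∧ n.2.2 < S) := by
        simpa [is_valid_position, and_assoc] using hv
      have hv1 : decide (0 ≤ n.1 ∧ n.1 < S) = true := by simp [hv'.1]
      have hv2 : decide (0 ≤ n.2.1 ∧ n.2.1 < S) = true := by simp [hv'.2.1]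
      have hv3 : decide (0 ≤ n.2.2 ∧ n.2.2 < S) = true := by simp [hv'.2.2]
      simp only [hv, hv1, hv2, hv3, not_true, if_false, Bool.true_and]
      split_ifs with h
      · simp only [Option.map_some, zc, hz, List.drop_succ_cons, List.drop_zero]
      · simp
    · have hcond : ((decide (0 ≤ n.1 ∧ n.1 < S) && pvAxisOk P1 S)
            && (decide (0 ≤ n.2.1 ∧ n.2.1 < S) && pvAxisOk P2 S)
            && (decide (0 ≤ n.2.2 ∧ n.2.2 < S) && pvAxisOk P3 S)) = false := by
        simp only [is_valid_position, Bool.and_eq_true, decide_eq_true_eq] at hv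
        simp only [Bool.and_eq_false_iff]
        by_cases a1 : (0 ≤ n.1 ∧ n.1 < S)
        · by_cases a2 : (0 ≤ n.2.1 ∧ n.2.1 < S)
          · have a3 : ¬ (0 ≤ n.2.2 ∧ n.2.2 < S) := fun h3 => hv ⟨⟨a1, a2⟩, h3⟩
            right; left; simp [a3]
          · left; right; left; simp [a2]
        · left; left; left; simp [a1]
      rw [hcond]
      simp only [Bool.not_eq_true] at hv
      simp [hv]

theorem assemble (S : Int) (sp : Int × Int × Int) (L1 L2 L3 : List Int)
    (e1 : L1 = sp.1 :: L1.drop 1) (e2 : L2 = sp.2.1 :: L2.drop 1) (e3 : L3 = sp.2.2 :: L3.drop 1) :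
    Option.map (fun x => sp :: x)
      (if (pvAxisOk L1 S && pvAxisOk L2 S && pvAxisOk L3 S) = true
       then some ((pvZip3 L1 L2 L3).drop 1) else none)
    = if (pvAxisOk L1 S && pvAxisOk L2 S && pvAxisOk L3 S) = true
      then some (pvZip3 L1 L2 L3) else none := by
  have hz : pvZip3 L1 L2 L3 = sp :: (pvZip3 L1 L2 L3).drop 1 := by
    conv_lhs => rw [e1, e2, e3]
    simp [pvZip3]
  split_ifs with h
  · simp only [Option.map_some]
    rw [← hz]
  · simp

-- ===== VERDICT (by name: the statement is the Claim_ definition above) =====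
theorem get_band_positions_spec : Claim_equal_get_band_positions := by
  intro start_pos sequence S _
  unfold Spec_get_band_positions get_band_positions get_band_positions_alt
  rw [loop_eq_axes]
  exact assemble S start_pos _ _ _ (pvPrefix_head_tail _ _) (pvPrefix_head_tail _ _)
    (pvPrefix_head_tail _ _)
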